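-- pv_equiv track=rewrite | github.com/sunman54/wagner_whitin | main.py | wagner_within
-- ===== SOURCE A (Python) =====
-- def wagner_within(talepler, stok_maliyeti, uretim_maliyeti):
--     n = len(talepler)
--
--     # dp tablosu, en küçük toplam maliyeti içerir
--     dp = [float('inf')] * (n + 1)
--
--     # Her dönemde ne kadar üretim yapılacağını ve dönemlik maliyetleri saklamak için liste
--     uretim_planlari = [[] for _ in range(n + 1)]
--     dönemlik_maliyetler = [[] for _ in range(n + 1)]
--
--     # Temel durum: 0. periyottaki maliyet = 0
--     dp[0] = 0
--
--     for i in range(1, n + 1):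
--         for j in range(i):
--             # Üretim miktarını belirle
--             uretim_miktari = sum(talepler[j:i])
--
--             # Toplam maliyeti güncelle
--             toplam_maliyet = dp[j] + stok_maliyeti * (i - j) + uretim_maliyeti * uretim_miktari
--
--             if toplam_maliyet < dp[i]:
--                 dp[i] = toplam_maliyet
--                 # Üretim planını ve dönemlik maliyeti güncelle
--                 uretim_planlari[i] = uretim_planlari[j] + [uretim_miktari]
--                 dönemlik_maliyetler[i] = dönemlik_maliyetler[j] + [uretim_miktari * uretim_maliyeti]
--
--     return dp[n], uretim_planlari, dönemlik_maliyetler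
-- ===== SOURCE B (Python) =====
-- def wagner_within(talepler, stok_maliyeti, uretim_maliyeti):
--     n = len(talepler)
--     # prefix[k] = sum of the first k demands, so any range sum is O(1)
--     prefix = [0] * (n + 1)
--     for k, d in enumerate(talepler):
--         prefix[k + 1] = prefix[k] + d
--     dp = [0] * (n + 1)
--     uretim_planlari = [[] for _ in range(n + 1)]
--     donemlik_maliyetler = [[] for _ in range(n + 1)]
--     for i in range(1, n + 1):
--         best_j, best_cost = min(
--             ((j, dp[j] + stok_maliyeti * (i - j)
--                  + uretim_maliyeti * (prefix[i] - prefix[j]))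
--              for j in range(i)),
--             key=lambda p: p[1])
--         dp[i] = best_cost
--         q = prefix[i] - prefix[best_j]
--         uretim_planlari[i] = uretim_planlari[best_j] + [q]
--         donemlik_maliyetler[i] = donemlik_maliyetler[best_j] + [q * uretim_maliyeti]
--     return dp[n], uretim_planlari, donemlik_maliyetler
-- ===== Notes on version B (the rewrite author's own statement) =====
-- stated objective: faster
-- what changed: B precomputes prefix sums of the demands so each candidate cost is O(1) instead of an O(n) slice sum, and picks the best split with a single first-minimum argmin per period instead of A's repeated in-place table overwrites.
import Mathlib
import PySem

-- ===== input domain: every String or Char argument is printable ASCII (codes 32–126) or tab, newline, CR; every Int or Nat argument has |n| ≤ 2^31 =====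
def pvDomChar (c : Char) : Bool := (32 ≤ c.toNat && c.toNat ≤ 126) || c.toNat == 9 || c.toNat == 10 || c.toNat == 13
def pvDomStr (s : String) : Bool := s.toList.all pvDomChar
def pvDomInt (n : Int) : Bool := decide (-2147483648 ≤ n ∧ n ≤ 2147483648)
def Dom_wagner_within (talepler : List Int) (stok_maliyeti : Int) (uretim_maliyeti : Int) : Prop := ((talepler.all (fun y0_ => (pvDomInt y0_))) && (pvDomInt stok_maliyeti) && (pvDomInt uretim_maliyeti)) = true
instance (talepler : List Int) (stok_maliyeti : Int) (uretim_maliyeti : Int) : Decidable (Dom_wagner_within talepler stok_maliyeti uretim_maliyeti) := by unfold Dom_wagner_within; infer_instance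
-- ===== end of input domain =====

-- B replaces A's O(n) slice sums by prefix sums and the in-place best-so-far table
-- rewrites by one argmin per period: an asymptotically faster (O(n^2) vs O(n^3)) exact
-- re-implementation.

-- ===== PORT A =====
-- Python's float('inf') initial dp entries are modelled as `none`; every dp entry that
-- is ever READ has been assigned an int before (dp[0]=0, dp[j] set in iteration j), so
-- the `.getD 0` on a read Option is never the default and the arithmetic is exact.
def wwStepA (talepler : List Int) (stok_maliyeti uretim_maliyeti : Int) (i : Nat)
    (st : List (Option Int) × List (List Int) × List (List Int)) (j : Nat) :
    List (Option Int) × List (List Int) × List (List Int) :=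
  let uretim_miktari : Int := (PySem.List.slice talepler (some (j : Int)) (some (i : Int))).sum
  let toplam_maliyet : Int :=
    ((st.1.getD j none).getD 0) + stok_maliyeti * ((i : Int) - (j : Int)) + uretim_maliyeti * uretim_miktari
  let better : Bool := match st.1.getD i none with
    | none => true                      -- toplam_maliyet < inf
    | some v => decide (toplam_maliyet < v)
  if better then
    (st.1.set i (some toplam_maliyet),
     st.2.1.set i ((st.2.1.getD j []) ++ [uretim_miktari]),
     st.2.2.set i ((st.2.2.getD j []) ++ [uretim_miktari * uretim_maliyeti]))
  else st

def wagner_within (talepler : List Int) (stok_maliyeti : Int) (uretim_maliyeti : Int) :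
    Int × List (List Int) × List (List Int) :=
  let n := talepler.length
  let st := (List.range n).foldl
    (fun st i0 => (List.range (i0 + 1)).foldl (wwStepA talepler stok_maliyeti uretim_maliyeti (i0 + 1)) st)
    ((List.replicate (n + 1) (none : Option Int)).set 0 (some 0),
     List.replicate (n + 1) ([] : List Int),
     List.replicate (n + 1) ([] : List Int))
  (((st.1.getD n none).getD 0), st.2.1, st.2.2)

-- ===== PORT B =====
-- prefix[k] = sum of the first k demands (built once, as in Source B)
def wwPrefix (talepler : List Int) : List Int :=
  talepler.foldl (fun acc d => acc ++ [acc.getLastD 0 + d]) [0]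

def wwCostB (dp pfx : List Int) (stok_maliyeti uretim_maliyeti : Int) (i j : Nat) : Int :=
  dp.getD j 0 + stok_maliyeti * ((i : Int) - (j : Int))
    + uretim_maliyeti * (pfx.getD i 0 - pfx.getD j 0)

-- Python's min(..., key=...): first element initialises, strictly smaller key replaces
def wwBestB (dp pfx : List Int) (stok_maliyeti uretim_maliyeti : Int) (i : Nat) : Nat × Int :=
  (List.range i).foldl
    (fun b j =>
      let c := wwCostB dp pfx stok_maliyeti uretim_maliyeti i j
      if c < b.2 then (j, c) else b)
    (0, wwCostB dp pfx stok_maliyeti uretim_maliyeti i 0)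

def wwStepB (pfx : List Int) (stok_maliyeti uretim_maliyeti : Int)
    (st : List Int × List (List Int) × List (List Int)) (i0 : Nat) :
    List Int × List (List Int) × List (List Int) :=
  let i := i0 + 1
  let b := wwBestB st.1 pfx stok_maliyeti uretim_maliyeti i
  let q := pfx.getD i 0 - pfx.getD b.1 0
  (st.1.set i b.2,
   st.2.1.set i ((st.2.1.getD b.1 []) ++ [q]),
   st.2.2.set i ((st.2.2.getD b.1 []) ++ [q * uretim_maliyeti]))

def wagner_within_alt (talepler : List Int) (stok_maliyeti : Int) (uretim_maliyeti : Int) :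
    Int × List (List Int) × List (List Int) :=
  let n := talepler.length
  let pfx := wwPrefix talepler
  let st := (List.range n).foldl (wwStepB pfx stok_maliyeti uretim_maliyeti)
    (List.replicate (n + 1) (0 : Int),
     List.replicate (n + 1) ([] : List Int),
     List.replicate (n + 1) ([] : List Int))
  (st.1.getD n 0, st.2.1, st.2.2)

-- ===== PRECONDITION & SPEC =====
def Spec_wagner_within (talepler : List Int) (stok_maliyeti : Int) (uretim_maliyeti : Int) (out : Int × List (List Int) × List (List Int)) : Prop := out = wagner_within_alt talepler stok_maliyeti uretim_maliyeti
instance (talepler : List Int) (stok_maliyeti : Int) (uretim_maliyeti : Int) (out : Int × List (List Int) × List (List Int)) : Decidable (Spec_wagner_within talepler stok_maliyeti uretim_maliyeti out) := by unfold Spec_wagner_within; infer_instance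

-- ===== CLAIM (what is proved, stated in full; the proofs are below) =====
def Claim_equal_wagner_within : Prop := ∀ (talepler : List Int) (stok_maliyeti : Int) (uretim_maliyeti : Int), Dom_wagner_within talepler stok_maliyeti uretim_maliyeti → Spec_wagner_within talepler stok_maliyeti uretim_maliyeti (wagner_within talepler stok_maliyeti uretim_maliyeti)

-- ===== LEMMAS AND PROOFS =====

theorem ww_getD_set_eq {α : Type} (l : List α) (i : Nat) (v d : α) (h : i < l.length) :
    (l.set i v).getD i d = v := by
  simp [List.getD_eq_getElem?_getD, List.getElem?_set_self (by simpa using h)]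

theorem ww_getD_set_ne {α : Type} (l : List α) (i j : Nat) (v d : α) (h : i ≠ j) :
    (l.set i v).getD j d = l.getD j d := by
  simp [List.getD_eq_getElem?_getD, List.getElem?_set_ne h]

theorem ww_getD_replicate {α : Type} (n k : Nat) (a : α) :
    (List.replicate n a).getD k a = a := by
  simp only [List.getD_eq_getElem?_getD, List.getElem?_replicate]
  split <;> rfl

-- prefix-sum characterisation of wwPrefix
def wwPsums (c : Int) : List Int → List Int
  | [] => []
  | d :: r => (c + d) :: wwPsums (c + d) r

theorem wwPrefix_fold (l : List Int) : ∀ (pre : List Int) (c : Int),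
    l.foldl (fun acc d => acc ++ [acc.getLastD 0 + d]) (pre ++ [c]) = pre ++ c :: wwPsums c l := by
  induction l with
  | nil => intro pre c; simp [wwPsums]
  | cons d r ih =>
    intro pre c
    have h1 : (pre ++ [c]).getLastD 0 = c := by simp
    have : (pre ++ [c]) ++ [c + d] = (pre ++ [c]) ++ [c + d] := rfl
    simp only [List.foldl_cons, h1]
    have := ih (pre ++ [c]) (c + d)
    simp only [List.append_assoc] at this ⊢
    rw [this]
    simp [wwPsums]

theorem wwPsums_getD : ∀ (l : List Int) (c : Int) (k : Nat), k < l.length →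
    (wwPsums c l).getD k 0 = c + (l.take (k + 1)).sum := by
  intro l
  induction l with
  | nil => intro c k h; simp at h
  | cons d r ih =>
    intro c k h
    cases k with
    | zero => simp [wwPsums]
    | succ k =>
      have hih := ih (c + d) k (by simpa using Nat.lt_of_succ_lt_succ h)
      simp only [wwPsums, List.getD_cons_succ, hih, List.take_succ_cons, List.sum_cons]
      ring

theorem wwPrefix_getD (l : List Int) (k : Nat) (h : k ≤ l.length) :
    (wwPrefix l).getD k 0 = (l.take k).sum := by
  have h0 : wwPrefix l = 0 :: wwPsums 0 l := by
    have := wwPrefix_fold l [] 0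
    simpa [wwPrefix] using this
  cases k with
  | zero => simp [h0]
  | succ k =>
    have hps := wwPsums_getD l 0 k (by omega)
    rw [h0, List.getD_cons_succ, hps]
    simp

-- slice sum = difference of prefix sums
theorem ww_slice_sum (l : List Int) (j i : Nat) (h : j ≤ i) :
    (PySem.List.slice l (some (j : Int)) (some (i : Int))).sum
      = (l.take i).sum - (l.take j).sum := by
  rw [PySem.List.slice_natCast]
  have hdt : (l.take i).drop j = (l.drop j).take (i - j) := by
    rw [List.drop_take]
  have hsplit : l.take i = (l.take i).take j ++ (l.take i).drop j := by
    simp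
  have htt : (l.take i).take j = l.take j := by
    rw [List.take_take, Nat.min_eq_left h]
  have : (l.take i).sum = (l.take j).sum + ((l.take i).drop j).sum := by
    conv_lhs => rw [hsplit]
    rw [List.sum_append, htt]
  rw [← hdt]
  omega

-- generic paired-fold lemma
theorem ww_foldl_pair {α β γ : Type} (f : α → γ → α) (g : β → γ → β) (R : α → β → Prop)
    (l : List γ) (h : ∀ a b c, c ∈ l → R a b → R (f a c) (g b c)) :
    ∀ a b, R a b → R (l.foldl f a) (l.foldl g b) := by
  induction l with
  | nil => intro a b hr; simpa using hr
  | cons c r ih =>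
    intro a b hr
    simp only [List.foldl_cons]
    exact ih (fun a b c hc => h a b c (List.mem_cons_of_mem _ hc)) _ _
      (h a b c (List.mem_cons_self) hr)

-- the inner loop of A, run from a state matching B's tables, performs exactly
-- B's single argmin-and-set update for period i
theorem ww_inner_eq (talepler : List Int) (s u : Int)
    (dpA : List (Option Int)) (dpB : List Int) (plans costs : List (List Int))
    (i : Nat) (hi : 1 ≤ i) (hin : i ≤ talepler.length)
    (hlen : dpA.length = talepler.length + 1)
    (hsome : ∀ j, j < i → dpA.getD j none = some (dpB.getD j 0))
    (hnone : dpA.getD i none = none) :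
    (List.range i).foldl (wwStepA talepler s u i) (dpA, plans, costs)
      = (dpA.set i (some (wwBestB dpB (wwPrefix talepler) s u i).2),
         plans.set i ((plans.getD (wwBestB dpB (wwPrefix talepler) s u i).1 []) ++
           [(wwPrefix talepler).getD i 0 - (wwPrefix talepler).getD (wwBestB dpB (wwPrefix talepler) s u i).1 0]),
         costs.set i ((costs.getD (wwBestB dpB (wwPrefix talepler) s u i).1 []) ++
           [((wwPrefix talepler).getD i 0 - (wwPrefix talepler).getD (wwBestB dpB (wwPrefix talepler) s u i).1 0) * u])) := by
  obtain ⟨m, rfl⟩ : ∃ m, i = m + 1 := ⟨i - 1, by omega⟩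
  set pfx := wwPrefix talepler with hpfx
  set i := m + 1
  -- the slice sum equals the prefix difference, for every j ≤ i
  have hq : ∀ j : Nat, j ≤ i →
      (PySem.List.slice talepler (some (j : Int)) (some (i : Int))).sum
        = pfx.getD i 0 - pfx.getD j 0 := by
    intro j hj
    rw [ww_slice_sum talepler j i hj, hpfx, wwPrefix_getD _ _ hin,
      wwPrefix_getD _ _ (le_trans hj hin)]
  -- A's candidate cost at j equals B's cost function, for every j < i
  have ht : ∀ (st : List (Option Int) × List (List Int) × List (List Int)) (j : Nat), j < i →
      st.1.getD j none = dpA.getD j none →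
      ((st.1.getD j none).getD 0) + s * ((i : Int) - (j : Int))
          + u * (PySem.List.slice talepler (some (j : Int)) (some (i : Int))).sum
        = wwCostB dpB pfx s u i j := by
    intro st j hj hst
    rw [hst, hsome j hj, hq j (le_of_lt hj)]
    simp [wwCostB]
  -- invariant relating A's running tables to B's running best
  let R : (List (Option Int) × List (List Int) × List (List Int)) → (Nat × Int) → Prop :=
    fun st b => st = (dpA.set i (some b.2),
      plans.set i ((plans.getD b.1 []) ++ [pfx.getD i 0 - pfx.getD b.1 0]),
      costs.set i ((costs.getD b.1 []) ++ [(pfx.getD i 0 - pfx.getD b.1 0) * u]))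
  have hilt : i < dpA.length := by omega
  -- one paired step preserves R for any 0 < j < i
  have hstep : ∀ st b (j : Nat), j ∈ (List.range m).map Nat.succ → R st b →
      R (wwStepA talepler s u i st j)
        ((fun b j => let c := wwCostB dpB pfx s u i j; if c < b.2 then (j, c) else b) b j) := by
    intro st b j hjmem hr
    obtain ⟨j0, hj0, rfl⟩ := List.mem_map.mp hjmem
    have hj0m : j0 < m := List.mem_range.mp hj0
    have hji : j0.succ < i := by omega
    have hne : i ≠ j0.succ := by omega
    have hst1j : st.1.getD j0.succ none = dpA.getD j0.succ none := by
      rw [hr]; exact ww_getD_set_ne _ _ _ _ _ hne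
    have hsti : st.1.getD i none = some b.2 := by
      rw [hr]; exact ww_getD_set_eq _ _ _ _ hilt
    have hcost := ht st j0.succ hji hst1j
    rw [hq j0.succ (le_of_lt hji)] at hcost
    by_cases hc : wwCostB dpB pfx s u i j0.succ < b.2
    · have hA : wwStepA talepler s u i st j0.succ =
          (st.1.set i (some (wwCostB dpB pfx s u i j0.succ)),
           st.2.1.set i ((st.2.1.getD j0.succ []) ++ [pfx.getD i 0 - pfx.getD j0.succ 0]),
           st.2.2.set i ((st.2.2.getD j0.succ []) ++ [(pfx.getD i 0 - pfx.getD j0.succ 0) * u])) := by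
        simp only [wwStepA, hsti, hq j0.succ (le_of_lt hji), hcost, hc, decide_true, if_true]
      show R _ _
      simp only [R, hc, if_true]
      rw [hA, hr]
      simp only [Prod.mk.injEq]
      refine ⟨by rw [List.set_set], ?_, ?_⟩
      · rw [ww_getD_set_ne _ _ _ _ _ hne, List.set_set]
      · rw [ww_getD_set_ne _ _ _ _ _ hne, List.set_set]
    · have hA : wwStepA talepler s u i st j0.succ = st := by
        simp only [wwStepA, hsti, hq j0.succ (le_of_lt hji), hcost, hc, decide_false]
        simp
      show R _ _
      simp only [R, hc, if_false]
      rw [hA]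
      exact hr
  -- unroll j = 0 on both sides, then run the paired fold
  have hrange : List.range i = 0 :: (List.range m).map Nat.succ := List.range_succ_eq_map
  have h0t : ((dpA.getD 0 none).getD 0) + s * ((i : Int) - (0 : Nat))
      + u * (PySem.List.slice talepler (some ((0 : Nat) : Int)) (some (i : Int))).sum
        = wwCostB dpB pfx s u i 0 := ht (dpA, plans, costs) 0 (by omega) rfl
  rw [hq 0 (by omega)] at h0t
  have hA0 : wwStepA talepler s u i (dpA, plans, costs) 0
      = (dpA.set i (some (wwCostB dpB pfx s u i 0)),
         plans.set i ((plans.getD 0 []) ++ [pfx.getD i 0 - pfx.getD 0 0]),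
         costs.set i ((costs.getD 0 []) ++ [(pfx.getD i 0 - pfx.getD 0 0) * u])) := by
    simp only [wwStepA, hnone, hq 0 (by omega), h0t, if_true]
  have hR0 : R (wwStepA talepler s u i (dpA, plans, costs) 0) (0, wwCostB dpB pfx s u i 0) := by
    rw [hA0]
  have hfold := ww_foldl_pair (wwStepA talepler s u i)
      (fun b j => let c := wwCostB dpB pfx s u i j; if c < b.2 then (j, c) else b) R
      ((List.range m).map Nat.succ) hstep _ _ hR0
  have hB : wwBestB dpB pfx s u i
      = ((List.range m).map Nat.succ).foldl
          (fun b j => let c := wwCostB dpB pfx s u i j; if c < b.2 then (j, c) else b)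
          (0, wwCostB dpB pfx s u i 0) := by
    simp only [wwBestB, hrange, List.foldl_cons]
    simp
  rw [hrange, List.foldl_cons, hB]
  exact hfold

-- ===== outer invariant =====
def wwFoldA (talepler : List Int) (s u : Int) (m : Nat) :
    List (Option Int) × List (List Int) × List (List Int) :=
  (List.range m).foldl
    (fun st i0 => (List.range (i0 + 1)).foldl (wwStepA talepler s u (i0 + 1)) st)
    ((List.replicate (talepler.length + 1) (none : Option Int)).set 0 (some 0),
     List.replicate (talepler.length + 1) ([] : List Int),
     List.replicate (talepler.length + 1) ([] : List Int))

def wwFoldB (talepler : List Int) (s u : Int) (m : Nat) :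
    List Int × List (List Int) × List (List Int) :=
  (List.range m).foldl (wwStepB (wwPrefix talepler) s u)
    (List.replicate (talepler.length + 1) (0 : Int),
     List.replicate (talepler.length + 1) ([] : List Int),
     List.replicate (talepler.length + 1) ([] : List Int))

theorem ww_outer_inv (talepler : List Int) (s u : Int) : ∀ (m : Nat), m ≤ talepler.length →
    (wwFoldA talepler s u m).1.length = talepler.length + 1 ∧
    (wwFoldB talepler s u m).1.length = talepler.length + 1 ∧
    (∀ k, k ≤ m → (wwFoldA talepler s u m).1.getD k none
        = some ((wwFoldB talepler s u m).1.getD k 0)) ∧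
    (∀ k, m < k → (wwFoldA talepler s u m).1.getD k none = none) ∧
    (wwFoldA talepler s u m).2.1 = (wwFoldB talepler s u m).2.1 ∧
    (wwFoldA talepler s u m).2.2 = (wwFoldB talepler s u m).2.2 := by
  intro m
  induction m with
  | zero =>
    intro _
    simp only [wwFoldA, wwFoldB, List.range_zero, List.foldl_nil]
    refine ⟨by simp, by simp, ?_, ?_, by trivial, by trivial⟩
    · intro k hk
      have hk0 : k = 0 := Nat.le_zero.mp hk
      subst hk0
      rw [ww_getD_set_eq _ _ _ _ (by simp), ww_getD_replicate]
    · intro k hk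
      rw [ww_getD_set_ne _ _ _ _ _ (by omega), ww_getD_replicate]
  | succ m ih =>
    intro hm
    obtain ⟨hla, hlb, hsome, hnone, hp, hc⟩ := ih (by omega)
    have hAstep : wwFoldA talepler s u (m + 1)
        = (List.range (m + 1)).foldl (wwStepA talepler s u (m + 1)) (wwFoldA talepler s u m) := by
      simp only [wwFoldA, List.range_succ, List.foldl_append, List.foldl_cons, List.foldl_nil]
    have hBstep : wwFoldB talepler s u (m + 1)
        = wwStepB (wwPrefix talepler) s u (wwFoldB talepler s u m) m := by
      simp only [wwFoldB, List.range_succ, List.foldl_append, List.foldl_cons, List.foldl_nil]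
    set a := wwFoldA talepler s u m
    set b := wwFoldB talepler s u m
    have hinner := ww_inner_eq talepler s u a.1 b.1 a.2.1 a.2.2 (m + 1) (by omega) hm
      hla (fun j hj => hsome j (by omega)) (hnone (m + 1) (by omega))
    have hsurj : a = (a.1, a.2.1, a.2.2) := rfl
    rw [hAstep, hBstep, ← hsurj] at *
    rw [hsurj, hinner]
    set bb := wwBestB b.1 (wwPrefix talepler) s u (m + 1) with hbb
    have hbstep : wwStepB (wwPrefix talepler) s u b m
        = (b.1.set (m + 1) bb.2,
           b.2.1.set (m + 1) ((b.2.1.getD bb.1 []) ++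
             [(wwPrefix talepler).getD (m + 1) 0 - (wwPrefix talepler).getD bb.1 0]),
           b.2.2.set (m + 1) ((b.2.2.getD bb.1 []) ++
             [((wwPrefix talepler).getD (m + 1) 0 - (wwPrefix talepler).getD bb.1 0) * u])) := rfl
    rw [hbstep]
    refine ⟨by simpa using hla, by simpa using hlb, ?_, ?_, by rw [hp, hc], by rw [hp, hc]⟩
    · intro k hk
      by_cases hki : k = m + 1
      · subst hki
        rw [ww_getD_set_eq _ _ _ _ (by omega), ww_getD_set_eq _ _ _ _ (by omega)]
      · rw [ww_getD_set_ne _ _ _ _ _ (by omega), ww_getD_set_ne _ _ _ _ _ (by omega)]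
        exact hsome k (by omega)
    · intro k hk
      rw [ww_getD_set_ne _ _ _ _ _ (by omega)]
      exact hnone k (by omega)

-- ===== VERDICT (by name: the statement is the Claim_ definition above) =====
theorem wagner_within_spec : Claim_equal_wagner_within := by
  intro talepler s u _
  obtain ⟨_, _, hsome, _, hp, hc⟩ := ww_outer_inv talepler s u talepler.length (le_refl _)
  show _ = _
  have hA : wagner_within talepler s u
      = (((wwFoldA talepler s u talepler.length).1.getD talepler.length none).getD 0,
         (wwFoldA talepler s u talepler.length).2.1,
         (wwFoldA talepler s u talepler.length).2.2) := rfl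
  have hB : wagner_within_alt talepler s u
      = ((wwFoldB talepler s u talepler.length).1.getD talepler.length 0,
         (wwFoldB talepler s u talepler.length).2.1,
         (wwFoldB talepler s u talepler.length).2.2) := rfl
  rw [hA, hB, hsome talepler.length (le_refl _), hp, hc]
  rfl
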